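-- pv_equiv track=rewrite | github.com/mpc-msri/EzPC | OnnxBridge/utils/backend_helper.py | nested_for_reshape_loop
-- ===== SOURCE A (Python) =====
-- def reshape_helper(counter, shape, variables, indent):
--     l = len(shape)
--     open_braces = "{"
--     close_braces = "}"
--     code = f"{'   ' * indent}{variables[l - counter - 1]} += 1;\n\n"
--     if len(shape) != counter + 1:
--         code += (
--             f"{'   ' * indent}if({variables[l - counter - 1]} == {shape[l - counter - 1]})\n"
--             f"{'   ' * indent}{open_braces}\n"
--         )
--         code += f"{'   ' * (indent + 1)}{variables[l - counter - 1]} = 0;\n"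
--         code += reshape_helper(counter + 1, shape, variables, indent + 1)
--         code += f"\n{'   ' * indent}{close_braces}"
--     return code
--
-- def nested_for_reshape_loop(
--     counter1, shape1, variables1, counter2, shape2, variables2, name1, name2, indent
-- ):
--     need = ""
--     open_braces = "{"
--     close_braces = "}"
--     loop = (
--         f"{'   ' * indent}for(int {variables2[counter2]} = 0; "
--         f"{variables2[counter2]} < {shape2[counter2]}; {variables2[counter2]}++)\n"
--         f"{'   ' * indent}{open_braces}\n"
--     )
--     if counter2 + 1 == len(shape2):
--         loop += (
--             f"{'   ' * (indent + 1)}{name2}{need.join(f'[{v}]' for v in variables2)} "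
--             f"= {name1}{need.join(f'[{v}]' for v in variables1)};\n\n"
--         )
--         loop += reshape_helper(counter1, shape1, variables1, indent + 1)
--     else:
--         loop += nested_for_reshape_loop(
--             counter1,
--             shape1,
--             variables1,
--             counter2 + 1,
--             shape2,
--             variables2,
--             name1,
--             name2,
--             indent + 1,
--         )
--     loop += f"\n{'   ' * indent}{close_braces}\n"
--     return loop
-- ===== SOURCE B (Python) =====
-- def incr_code(counter, shape, variables, indent):
--     l = len(shape)
--     parts = []
--     c, ind = counter, indent
--     while True:
--         v = variables[l - c - 1]
--         parts.append("   " * ind + v + " += 1;\n\n")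
--         if c == l - 1:
--             break
--         parts.append(
--             "   " * ind + "if(" + v + " == " + str(shape[l - c - 1]) + ")\n"
--             + "   " * ind + "{\n"
--             + "   " * (ind + 1) + v + " = 0;\n"
--         )
--         c += 1
--         ind += 1
--     out = "".join(parts)
--     for d in reversed(range(indent, ind)):
--         out += "\n" + "   " * d + "}"
--     return out
--
--
-- def nested_for_reshape_loop(
--     counter1, shape1, variables1, counter2, shape2, variables2, name1, name2, indent
-- ):
--     L = len(shape2)
--     parts = []
--     level, i = counter2, indent
--     while True:
--         v = variables2[level]
--         parts.append(
--             "   " * i + "for(int " + v + " = 0; " + v + " < " + str(shape2[level])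
--             + "; " + v + "++)\n" + "   " * i + "{\n"
--         )
--         if level + 1 == L:
--             break
--         level += 1
--         i += 1
--     inner = i + 1
--     idx2 = "".join("[" + v + "]" for v in variables2)
--     idx1 = "".join("[" + v + "]" for v in variables1)
--     out = "".join(parts)
--     out += "   " * inner + name2 + idx2 + " = " + name1 + idx1 + ";\n\n"
--     out += incr_code(counter1, shape1, variables1, inner)
--     for d in reversed(range(indent, inner)):
--         out += "\n" + "   " * d + "}\n"
--     return out
-- ===== Notes on version B (the rewrite author's own statement) =====
-- stated objective: alternative
-- what changed: Both linear recursions (the main one on counter2 and reshape_helper's on counter) are replaced by flat do-while passes that collect the emitted lines in a list joined once, with a running indent, and append the closing braces in a reversed range loop; Pre_ excludes only inputs on which A raises IndexError (out-of-range counters or too few variable names).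
import Mathlib
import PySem

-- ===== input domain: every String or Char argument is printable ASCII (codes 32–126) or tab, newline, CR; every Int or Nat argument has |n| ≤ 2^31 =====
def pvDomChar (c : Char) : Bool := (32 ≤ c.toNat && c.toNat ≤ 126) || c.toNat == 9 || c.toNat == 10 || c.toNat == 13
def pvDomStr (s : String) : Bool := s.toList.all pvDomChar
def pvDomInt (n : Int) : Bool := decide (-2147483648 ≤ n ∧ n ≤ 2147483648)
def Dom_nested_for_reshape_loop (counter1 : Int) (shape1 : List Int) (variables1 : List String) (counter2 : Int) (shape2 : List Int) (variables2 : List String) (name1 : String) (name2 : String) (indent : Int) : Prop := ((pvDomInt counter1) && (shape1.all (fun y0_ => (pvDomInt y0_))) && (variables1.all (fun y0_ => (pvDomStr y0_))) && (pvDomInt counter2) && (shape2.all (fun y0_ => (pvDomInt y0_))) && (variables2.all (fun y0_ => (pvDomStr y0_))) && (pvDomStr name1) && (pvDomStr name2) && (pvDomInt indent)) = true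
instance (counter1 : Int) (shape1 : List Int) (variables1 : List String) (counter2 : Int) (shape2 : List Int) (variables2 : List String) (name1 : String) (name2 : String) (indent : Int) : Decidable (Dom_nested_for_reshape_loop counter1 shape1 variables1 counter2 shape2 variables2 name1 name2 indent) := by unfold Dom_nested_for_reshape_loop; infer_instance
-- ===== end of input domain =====

-- B replaces both linear recursions (the main one on counter2 and reshape_helper's on counter)
-- by flat do-while passes with a running indent, collecting the emitted lines in a list, and
-- closes all braces afterwards in a reversed range loop.  Objective: alternative decomposition.

-- Python '   ' * i  (max(i,0) copies); exact, used by both ports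
def pvSpaces (i : Int) : String := String.join (List.replicate i.toNat "   ")

-- ''.join(f'[{v}]' for v in vs); exact, used by both ports
def pvBrackets (vs : List String) : String := (vs.map (fun v => "[" ++ v ++ "]")).foldl (· ++ ·) ""

-- ===== PORT A =====
-- reshape_helper, fueled (fuel only makes the Python recursion total; inside Pre_ the
-- fuel (len(shape) - counter).toNat given at the call site is never exhausted)
def reshape_helper_port : Nat → Int → List Int → List String → Int → String
  | 0, _, _, _, _ => ""
  | (fuel+1), counter, shape, vars, indent =>
    let l : Int := shape.length
    let v := (PySem.List.pyGet? vars (l - counter - 1)).getD ""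
    let code := pvSpaces indent ++ v ++ " += 1;\n\n"
    if l ≠ counter + 1 then
      code
      ++ pvSpaces indent ++ "if(" ++ v ++ " == " ++ PySem.Int.toStr ((PySem.List.pyGet? shape (l - counter - 1)).getD 0) ++ ")\n"
      ++ pvSpaces indent ++ "{\n"
      ++ pvSpaces (indent+1) ++ v ++ " = 0;\n"
      ++ reshape_helper_port fuel (counter+1) shape vars (indent+1)
      ++ "\n" ++ pvSpaces indent ++ "}"
    else code

-- main recursion of A, fueled the same way
def nflA : Nat → Int → List Int → List String → Int → List Int → List String → String → String → Int → String
  | 0, _, _, _, _, _, _, _, _, _ => ""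
  | (fuel+1), counter1, shape1, variables1, counter2, shape2, variables2, name1, name2, indent =>
    let v := (PySem.List.pyGet? variables2 counter2).getD ""
    let loop := pvSpaces indent ++ "for(int " ++ v ++ " = 0; " ++ v ++ " < "
      ++ PySem.Int.toStr ((PySem.List.pyGet? shape2 counter2).getD 0) ++ "; " ++ v ++ "++)\n"
      ++ pvSpaces indent ++ "{\n"
    let loop :=
      if counter2 + 1 = (shape2.length : Int) then
        loop ++ pvSpaces (indent+1) ++ name2 ++ pvBrackets variables2 ++ " = " ++ name1 ++ pvBrackets variables1 ++ ";\n\n"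
        ++ reshape_helper_port ((shape1.length - counter1).toNat) counter1 shape1 variables1 (indent+1)
      else
        loop ++ nflA fuel counter1 shape1 variables1 (counter2+1) shape2 variables2 name1 name2 (indent+1)
    loop ++ "\n" ++ pvSpaces indent ++ "}\n"

def nested_for_reshape_loop (counter1 : Int) (shape1 : List Int) (variables1 : List String) (counter2 : Int) (shape2 : List Int) (variables2 : List String) (name1 : String) (name2 : String) (indent : Int) : String :=
  nflA ((shape2.length - counter2).toNat) counter1 shape1 variables1 counter2 shape2 variables2 name1 name2 indent

-- ===== PORT B =====
-- the closing-brace pass: 'for d in reversed(range(a, b)): out += g(d)'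
def pvCloseFold (g : Int → String) (a b : Int) (s : String) : String :=
  ((PySem.List.pyRange a b 1).reverse).foldl (fun acc d => acc ++ g d) s

-- Source B's do-while in incr_code (fueled; inside Pre_ the call-site fuel is never exhausted):
-- returns (the joined parts, the final ind)
def bIncr : Nat → Int → Int → List Int → List String → (String × Int)
  | 0, _, ind, _, _ => ("", ind)
  | (fuel+1), c, ind, shape, vars =>
    let l : Int := shape.length
    let v := (PySem.List.pyGet? vars (l - c - 1)).getD ""
    let line := pvSpaces ind ++ v ++ " += 1;\n\n"
    if c = l - 1 then (line, ind)
    else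
      (line ++ (pvSpaces ind ++ "if(" ++ v ++ " == " ++ PySem.Int.toStr ((PySem.List.pyGet? shape (l - c - 1)).getD 0) ++ ")\n"
        ++ pvSpaces ind ++ "{\n" ++ pvSpaces (ind+1) ++ v ++ " = 0;\n")
        ++ (bIncr fuel (c+1) (ind+1) shape vars).1,
       (bIncr fuel (c+1) (ind+1) shape vars).2)

def incr_code_port (counter : Int) (shape : List Int) (vars : List String) (indent : Int) : String :=
  pvCloseFold (fun d => "\n" ++ pvSpaces d ++ "}") indent
    (bIncr ((shape.length - counter).toNat) counter indent shape vars).2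
    (bIncr ((shape.length - counter).toNat) counter indent shape vars).1

-- Source B's do-while over the for-headers (fueled the same way): (joined headers, final i)
def bLoop : Nat → Int → Int → List Int → List String → (String × Int)
  | 0, _, i, _, _ => ("", i)
  | (fuel+1), level, i, shape2, vars2 =>
    let v := (PySem.List.pyGet? vars2 level).getD ""
    let part := pvSpaces i ++ "for(int " ++ v ++ " = 0; " ++ v ++ " < "
      ++ PySem.Int.toStr ((PySem.List.pyGet? shape2 level).getD 0) ++ "; " ++ v ++ "++)\n"
      ++ pvSpaces i ++ "{\n"
    if level + 1 = (shape2.length : Int) then (part, i)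
    else
      (part ++ (bLoop fuel (level+1) (i+1) shape2 vars2).1,
       (bLoop fuel (level+1) (i+1) shape2 vars2).2)

def nested_for_reshape_loop_alt (counter1 : Int) (shape1 : List Int) (variables1 : List String) (counter2 : Int) (shape2 : List Int) (variables2 : List String) (name1 : String) (name2 : String) (indent : Int) : String :=
  let inner := (bLoop ((shape2.length - counter2).toNat) counter2 indent shape2 variables2).2 + 1
  pvCloseFold (fun d => "\n" ++ pvSpaces d ++ "}\n") indent inner
    ((bLoop ((shape2.length - counter2).toNat) counter2 indent shape2 variables2).1
     ++ (pvSpaces inner ++ name2 ++ pvBrackets variables2 ++ " = " ++ name1 ++ pvBrackets variables1 ++ ";\n\n")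
     ++ incr_code_port counter1 shape1 variables1 inner)

-- ===== PRECONDITION & SPEC =====
-- Pre_ is exactly the set of inputs on which the Python A returns (everywhere else it raises
-- IndexError): counters within range (counter2 may be negative down to -len(shape2), where
-- Python's negative indexing still returns; counter1 = -1 only in the degenerate len(shape1) = 0
-- case) and enough loop-variable names for every index reshape_helper/the main loop touches.
def Pre_nested_for_reshape_loop (counter1 : Int) (shape1 : List Int) (variables1 : List String) (counter2 : Int) (shape2 : List Int) (variables2 : List String) (name1 : String) (name2 : String) (indent : Int) : Prop :=
  ((0 ≤ counter1 ∧ counter1 < (shape1.length : Int)) ∨ (counter1 = -1 ∧ shape1.length = 0)) ∧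
  (shape1.length : Int) - counter1 ≤ (variables1.length : Int) ∧
  -(shape2.length : Int) ≤ counter2 ∧ counter2 < (shape2.length : Int) ∧ (shape2.length : Int) ≤ (variables2.length : Int)
instance (counter1 : Int) (shape1 : List Int) (variables1 : List String) (counter2 : Int) (shape2 : List Int) (variables2 : List String) (name1 : String) (name2 : String) (indent : Int) : Decidable (Pre_nested_for_reshape_loop counter1 shape1 variables1 counter2 shape2 variables2 name1 name2 indent) := by unfold Pre_nested_for_reshape_loop; infer_instance

def pvWitness_nested_for_reshape_loop : Int × List Int × List String × Int × List Int × List String × String × String × Int :=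
  (0, [2], ["i"], 0, [2], ["j"], "A", "B", 0)

def Spec_nested_for_reshape_loop (counter1 : Int) (shape1 : List Int) (variables1 : List String) (counter2 : Int) (shape2 : List Int) (variables2 : List String) (name1 : String) (name2 : String) (indent : Int) (out : String) : Prop := out = nested_for_reshape_loop_alt counter1 shape1 variables1 counter2 shape2 variables2 name1 name2 indent
instance (counter1 : Int) (shape1 : List Int) (variables1 : List String) (counter2 : Int) (shape2 : List Int) (variables2 : List String) (name1 : String) (name2 : String) (indent : Int) (out : String) : Decidable (Spec_nested_for_reshape_loop counter1 shape1 variables1 counter2 shape2 variables2 name1 name2 indent out) := by unfold Spec_nested_for_reshape_loop; infer_instance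

-- ===== CLAIM (what is proved, stated in full; the proofs are below) =====
def Claim_equal_nested_for_reshape_loop : Prop := ∀ (counter1 : Int) (shape1 : List Int) (variables1 : List String) (counter2 : Int) (shape2 : List Int) (variables2 : List String) (name1 : String) (name2 : String) (indent : Int), Dom_nested_for_reshape_loop counter1 shape1 variables1 counter2 shape2 variables2 name1 name2 indent → Pre_nested_for_reshape_loop counter1 shape1 variables1 counter2 shape2 variables2 name1 name2 indent → Spec_nested_for_reshape_loop counter1 shape1 variables1 counter2 shape2 variables2 name1 name2 indent (nested_for_reshape_loop counter1 shape1 variables1 counter2 shape2 variables2 name1 name2 indent)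

-- ===== LEMMAS AND PROOFS =====

-- pull the fold's accumulator out in front (String is a monoid)
theorem pv_foldl_str {α : Type} (h : α → String) : ∀ (l : List α) (a : String), l.foldl (fun acc d => acc ++ h d) a = a ++ l.foldl (fun acc d => acc ++ h d) ""
  | [], a => by simp
  | x :: t, a => by
    simp only [List.foldl_cons]
    rw [pv_foldl_str h t (a ++ h x), pv_foldl_str h t ("" ++ h x), String.empty_append,
      String.append_assoc]

theorem pvCloseFold_nil (g : Int → String) (a b : Int) (s : String) (h : b ≤ a) :
    pvCloseFold g a b s = s := by
  simp [pvCloseFold, PySem.List.pyRange_one_eq_nil h]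

theorem pvCloseFold_peel (g : Int → String) (a b : Int) (s : String) (h : a < b) :
    pvCloseFold g a b s = pvCloseFold g (a+1) b s ++ g a := by
  simp only [pvCloseFold]
  rw [PySem.List.pyRange_one_cons h, List.reverse_cons, List.foldl_append]
  simp

theorem pvCloseFold_factor (g : Int → String) (a b : Int) (x y : String) :
    pvCloseFold g a b (x ++ y) = x ++ pvCloseFold g a b y := by
  simp only [pvCloseFold]
  rw [pv_foldl_str (fun d => g d) ((PySem.List.pyRange a b 1).reverse) (x ++ y),
    pv_foldl_str (fun d => g d) ((PySem.List.pyRange a b 1).reverse) y, String.append_assoc]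

-- inside Pre_, bIncr's final ind is determined
theorem bIncr_snd (shape : List Int) (vars : List String) :
    ∀ (k : Nat) (c ind : Int), c < (shape.length : Int) → ((shape.length : Int) - c).toNat = k →
    (bIncr k c ind shape vars).2 = ind + ((shape.length : Int) - 1 - c) := by
  intro k
  induction k with
  | zero => intro c ind h1 hk; omega
  | succ k ih =>
    intro c ind h1 hk
    by_cases hlast : c = (shape.length : Int) - 1
    · simp only [bIncr]; rw [if_pos hlast]; omega
    · simp only [bIncr]; rw [if_neg hlast]
      have := ih (c+1) (ind+1) (by omega) (by omega)
      simpa using by omega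

-- A's reshape_helper equals B's incr_code rendering
theorem reshape_eq_bIncr (shape : List Int) (vars : List String) :
    ∀ (k : Nat) (c ind : Int), c < (shape.length : Int) → ((shape.length : Int) - c).toNat = k →
    reshape_helper_port k c shape vars ind =
      pvCloseFold (fun d => "\n" ++ pvSpaces d ++ "}") ind (bIncr k c ind shape vars).2 (bIncr k c ind shape vars).1 := by
  intro k
  induction k with
  | zero => intro c ind h1 hk; omega
  | succ k ih =>
    intro c ind h1 hk
    by_cases hlast : c = (shape.length : Int) - 1
    · simp only [bIncr, reshape_helper_port]
      rw [if_pos hlast, if_neg (show ¬ ((shape.length : Int) ≠ c + 1) from by omega)]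
      rw [pvCloseFold_nil _ _ _ _ (le_refl ind)]
    · have hsnd := bIncr_snd shape vars k (c+1) (ind+1) (by omega) (by omega)
      simp only [bIncr, reshape_helper_port]
      rw [if_neg hlast, if_pos (show ((shape.length : Int)) ≠ c + 1 from by omega)]
      rw [pvCloseFold_peel _ _ _ _ (show ind < (bIncr k (c+1) (ind+1) shape vars).2 from by omega)]
      rw [pvCloseFold_factor]
      rw [← ih (c+1) (ind+1) (by omega) (by omega)]
      simp [String.append_assoc]

theorem incr_eq (shape : List Int) (vars : List String) (c ind : Int) (h : c < (shape.length : Int)) :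
    reshape_helper_port ((shape.length - c).toNat) c shape vars ind = incr_code_port c shape vars ind := by
  rw [reshape_eq_bIncr shape vars _ c ind h rfl]
  simp only [incr_code_port]

-- inside Pre_, bLoop's final i is determined
theorem bLoop_snd (shape2 : List Int) (vars2 : List String) :
    ∀ (k : Nat) (level i : Int), level < (shape2.length : Int) → ((shape2.length : Int) - level).toNat = k →
    (bLoop k level i shape2 vars2).2 = i + ((shape2.length : Int) - 1 - level) := by
  intro k
  induction k with
  | zero => intro level i h1 hk; omega
  | succ k ih =>
    intro level i h1 hk
    by_cases hlast : level + 1 = (shape2.length : Int)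
    · simp only [bLoop]; rw [if_pos hlast]; omega
    · simp only [bLoop]; rw [if_neg hlast]
      have := ih (level+1) (i+1) (by omega) (by omega)
      simpa using by omega

-- A's main recursion equals B's flat rendering
theorem nflA_eq_alt (counter1 : Int) (shape1 : List Int) (variables1 : List String)
    (shape2 : List Int) (variables2 : List String) (name1 name2 : String)
    (hc1 : counter1 < (shape1.length : Int)) :
    ∀ (k : Nat) (level ind : Int), level < (shape2.length : Int) → ((shape2.length : Int) - level).toNat = k →
    nflA k counter1 shape1 variables1 level shape2 variables2 name1 name2 ind =
      pvCloseFold (fun d => "\n" ++ pvSpaces d ++ "}\n") ind ((bLoop k level ind shape2 variables2).2 + 1)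
        ((bLoop k level ind shape2 variables2).1
         ++ (pvSpaces ((bLoop k level ind shape2 variables2).2 + 1) ++ name2 ++ pvBrackets variables2 ++ " = " ++ name1 ++ pvBrackets variables1 ++ ";\n\n")
         ++ incr_code_port counter1 shape1 variables1 ((bLoop k level ind shape2 variables2).2 + 1)) := by
  intro k
  induction k with
  | zero => intro level ind h1 hk; omega
  | succ k ih =>
    intro level ind h1 hk
    by_cases hlast : level + 1 = (shape2.length : Int)
    · simp only [bLoop, nflA]
      rw [if_pos hlast, if_pos hlast]
      dsimp only
      rw [pvCloseFold_peel _ _ _ _ (show ind < ind + 1 from by omega),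
        pvCloseFold_nil _ _ _ _ (le_refl (ind+1))]
      rw [← incr_eq shape1 variables1 counter1 (ind+1) hc1]
      simp [String.append_assoc]
    · have hsnd := bLoop_snd shape2 variables2 k (level+1) (ind+1) (by omega) (by omega)
      simp only [bLoop, nflA]
      rw [if_neg hlast, if_neg hlast]
      dsimp only
      rw [ih (level+1) (ind+1) (by omega) (by omega)]
      rw [pvCloseFold_peel _ _ _ _ (show ind < (bLoop k (level+1) (ind+1) shape2 variables2).2 + 1 from by omega)]
      simp [pvCloseFold_factor, String.append_assoc]

-- ===== VERDICT (by name: the statement is the Claim_ definition above) =====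
theorem nested_for_reshape_loop_spec : Claim_equal_nested_for_reshape_loop := by
  intro counter1 shape1 variables1 counter2 shape2 variables2 name1 name2 indent _ hpre
  obtain ⟨h1, _, _, h5, _⟩ := hpre
  unfold Spec_nested_for_reshape_loop nested_for_reshape_loop nested_for_reshape_loop_alt
  exact nflA_eq_alt counter1 shape1 variables1 shape2 variables2 name1 name2 (by omega)
    _ counter2 indent h5 rfl
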